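-- pv_equiv track=rewrite | github.com/matpmag/Bin-Collections | app.py | choose_postcode_field
-- ===== SOURCE A (Python) =====
-- from typing import Dict, Optional, Tuple
--
-- def choose_postcode_field(fields: Dict[str, str]) -> Optional[str]:
--     candidates = [
--         k
--         for k in fields.keys()
--         if (
--             ("postcode" in k.lower())
--             and ("hidden" not in k.lower())
--             and not k.startswith("__")
--         )
--     ]
--     # Fallback: any single text-like field
--     if not candidates:
--         candidates = [k for k in fields.keys() if ("$tb" in k.lower() or "txt" in k.lower())]
--     return candidates[0] if candidates else None
-- ===== SOURCE B (Python) =====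
-- from typing import Dict, Optional
--
-- def choose_postcode_field(fields: Dict[str, str]) -> Optional[str]:
--     first_fallback = None
--     for k in fields.keys():
--         kl = k.lower()
--         if "postcode" in kl and "hidden" not in kl and not k.startswith("__"):
--             return k
--         if first_fallback is None and ("$tb" in kl or "txt" in kl):
--             first_fallback = k
--     return first_fallback
-- ===== Notes on version B (the rewrite author's own statement) =====
-- stated objective: simpler
-- what changed: Replaces A's two list-comprehension passes plus indexing with a single short-circuit loop that returns the first primary match immediately and remembers the first fallback match.
import Mathlib
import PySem

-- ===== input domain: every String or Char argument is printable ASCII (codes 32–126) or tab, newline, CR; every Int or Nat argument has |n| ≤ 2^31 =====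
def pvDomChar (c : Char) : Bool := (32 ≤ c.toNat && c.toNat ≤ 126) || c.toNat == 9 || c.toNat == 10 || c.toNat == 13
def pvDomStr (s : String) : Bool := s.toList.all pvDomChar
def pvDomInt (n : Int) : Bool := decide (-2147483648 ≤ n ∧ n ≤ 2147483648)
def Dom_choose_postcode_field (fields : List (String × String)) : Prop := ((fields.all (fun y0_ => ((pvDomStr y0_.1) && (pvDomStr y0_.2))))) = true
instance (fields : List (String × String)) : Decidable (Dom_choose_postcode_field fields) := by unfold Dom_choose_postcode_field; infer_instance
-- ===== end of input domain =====

-- ===== PORT A =====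
-- B replaces A's two filter passes with one short-circuit pass (objective: simpler).
-- shared predicates (the same conditions both Python versions test)
def pcPrimary (k : String) : Bool :=
  PySem.Str.isIn "postcode" (PySem.Str.lower k) &&
    !(PySem.Str.isIn "hidden" (PySem.Str.lower k)) &&
    !(PySem.Str.startswith k "__")

def pcFallback (k : String) : Bool :=
  PySem.Str.isIn "$tb" (PySem.Str.lower k) || PySem.Str.isIn "txt" (PySem.Str.lower k)

-- fields.keys(): insertion-order distinct keys of the dict (dedup of first components)
def choose_postcode_field (fields : List (String × String)) : Option String :=
  let keys := PySem.List.dedup (fields.map Prod.fst)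
  let candidates := keys.filter pcPrimary
  let candidates := if candidates.isEmpty then keys.filter pcFallback else candidates
  candidates.head?

-- ===== PORT B =====
def pcLoop : List String → Option String → Option String
  | [], first_fallback => first_fallback
  | k :: rest, first_fallback =>
    if pcPrimary k then some k
    else pcLoop rest
      (if first_fallback.isNone && pcFallback k then some k else first_fallback)

def choose_postcode_field_alt (fields : List (String × String)) : Option String :=
  pcLoop (PySem.List.dedup (fields.map Prod.fst)) none

-- ===== PRECONDITION & SPEC =====
def Spec_choose_postcode_field (fields : List (String × String)) (out : Option String) : Prop := out = choose_postcode_field_alt fields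
instance (fields : List (String × String)) (out : Option String) : Decidable (Spec_choose_postcode_field fields out) := by unfold Spec_choose_postcode_field; infer_instance

-- ===== CLAIM (what is proved, stated in full; the proofs are below) =====
def Claim_equal_choose_postcode_field : Prop := ∀ (fields : List (String × String)), Dom_choose_postcode_field fields → Spec_choose_postcode_field fields (choose_postcode_field fields)

-- ===== LEMMAS AND PROOFS =====
theorem pcLoop_eq (ks : List String) : ∀ fb : Option String,
    pcLoop ks fb = ((ks.filter pcPrimary).head?).or (fb.or (ks.filter pcFallback).head?) := by
  induction ks with
  | nil => intro fb; simp [pcLoop]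
  | cons k rest ih =>
    intro fb
    by_cases hp : pcPrimary k = true
    · simp [pcLoop, hp]
    · cases fb with
      | some f => simp [pcLoop, hp, ih]
      | none =>
        by_cases hf : pcFallback k = true
        · simp [pcLoop, hp, hf, ih]
        · simp [pcLoop, hp, hf, ih]

-- ===== VERDICT (by name: the statement is the Claim_ definition above) =====
theorem choose_postcode_field_spec : Claim_equal_choose_postcode_field := by
  intro fields _
  unfold Spec_choose_postcode_field choose_postcode_field choose_postcode_field_alt
  rw [pcLoop_eq]
  generalize PySem.List.dedup (fields.map Prod.fst) = ks
  cases hc : ks.filter pcPrimary with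
  | nil => simp [hc]
  | cons v vs => simp [hc]
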